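-- pv_equiv track=rewrite | github.com/simon0302010/koba | koba/core/font.py | get_best_candidate
-- ===== SOURCE A (Python) =====
-- STYLE_RANK = {
--     "Regular": 0,
--     "Book": 1,
--     "Normal": 2,
--     "Medium": 3,
--     "SemiBold": 4,
--     "Bold": 5,
--     "ExtraBold": 6,
--     "Light": 7,
--     "ExtraLight": 8,
--     "Thin": 9,
-- }
--
-- def get_best_candidate(font_paths):
--     # only monospace fonts that aren't italic
--     candidates = [
--         p for p in font_paths
--         if "mono" in p.lower() and "italic" not in p.lower() and "propo" not in p.lower()
--     ]
--
--     # rank fonts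
--     def score(path):
--         for style, rank in STYLE_RANK.items():
--             if style.lower() in path.lower():
--                 return rank
--         return 99
--
--     best = min(candidates, key=score, default=None)
--     return best
-- ===== SOURCE B (Python) =====
-- LOWER_STYLES = ["regular", "book", "normal", "medium", "semibold",
--                 "bold", "extrabold", "light", "extralight", "thin"]
--
--
-- def _rank(low):
--     # index of the first style substring present (table is in rank order), else 99
--     for i, sub in enumerate(LOWER_STYLES):
--         if sub in low:
--             return i
--     return 99
--
--
-- def get_best_candidate(font_paths):
--     # bucket selection: remember the first candidate path per style rank,
--     # then probe the ranks in increasing order (no comparison-based min at all)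
--     first_by_rank = {}
--     for p in font_paths:
--         low = p.lower()
--         if "mono" in low and "italic" not in low and "propo" not in low:
--             first_by_rank.setdefault(_rank(low), p)
--     for r in range(10):
--         if r in first_by_rank:
--             return first_by_rank[r]
--     return first_by_rank.get(99)
-- ===== Notes on version B (the rewrite author's own statement) =====
-- stated objective: alternative
-- what changed: Replaced min(key=score) over a filtered comprehension by a bucket (pigeonhole) selection: one pass records the first candidate path per style rank in a dict, then the ranks 0..9 (and the fallback 99) are probed in increasing order, so no comparison-based minimum is computed at all.
import Mathlib
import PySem

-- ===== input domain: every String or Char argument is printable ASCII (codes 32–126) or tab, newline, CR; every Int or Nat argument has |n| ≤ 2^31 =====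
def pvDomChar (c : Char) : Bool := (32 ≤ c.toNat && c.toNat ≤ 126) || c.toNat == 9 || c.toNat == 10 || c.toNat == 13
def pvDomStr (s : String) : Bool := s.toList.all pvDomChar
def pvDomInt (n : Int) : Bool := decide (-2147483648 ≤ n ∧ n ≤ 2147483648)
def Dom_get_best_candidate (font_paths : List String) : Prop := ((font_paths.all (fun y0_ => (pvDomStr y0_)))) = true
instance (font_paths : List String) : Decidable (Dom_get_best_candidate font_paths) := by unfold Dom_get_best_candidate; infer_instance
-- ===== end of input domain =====

-- B replaces min(key=score) over a filtered comprehension by bucket selection: one pass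
-- records the first candidate per style rank in a dict, then ranks 0..9 (fallback 99)
-- are probed in increasing order; no comparison-based minimum is computed.

-- ===== PORT A =====
def pvStyleRank : PySem.Dict String Int := PySem.Dict.ofList
  [("Regular", 0), ("Book", 1), ("Normal", 2), ("Medium", 3), ("SemiBold", 4),
   ("Bold", 5), ("ExtraBold", 6), ("Light", 7), ("ExtraLight", 8), ("Thin", 9)]

-- A's inner 'score': loop over STYLE_RANK.items(), return first matching rank, else 99
def pvScoreGo : List (String × Int) → String → Int
  | [], _ => 99
  | (style, rank) :: rest, path =>
      if PySem.Str.isIn (PySem.Str.lower style) (PySem.Str.lower path) then rank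
      else pvScoreGo rest path

def pvScore (path : String) : Int := pvScoreGo pvStyleRank.items path

def get_best_candidate (font_paths : List String) : Option String :=
  let candidates := font_paths.filter (fun p =>
    PySem.Str.isIn "mono" (PySem.Str.lower p) &&
    !PySem.Str.isIn "italic" (PySem.Str.lower p) &&
    !PySem.Str.isIn "propo" (PySem.Str.lower p))
  PySem.List.min? candidates pvScore

-- ===== PORT B =====
def pvStylesB : List String :=
  ["regular", "book", "normal", "medium", "semibold",
   "bold", "extrabold", "light", "extralight", "thin"]

-- B's _rank: first matching style substring's index in the table, else 99
def pvRankB (low : String) : Int :=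
  match (PySem.List.enumerate pvStylesB).find? (fun q => PySem.Str.isIn q.2 low) with
  | some q => q.1
  | none => 99

-- one iteration of B's bucketing loop: first_by_rank.setdefault(_rank(low), p)
def pvStepB (d : PySem.Dict Int String) (p : String) : PySem.Dict Int String :=
  let low := PySem.Str.lower p
  if PySem.Str.isIn "mono" low && !PySem.Str.isIn "italic" low && !PySem.Str.isIn "propo" low then
    d.setdefault (pvRankB low) p
  else d

-- B's second loop: probe ranks 0..9 in order, else the 99 bucket
def pvFindRank (d : PySem.Dict Int String) : Option String :=
  match (PySem.List.pyRange 0 10 1).find? (fun r => d.contains r) with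
  | some r => d.get? r
  | none => d.get? 99

def get_best_candidate_alt (font_paths : List String) : Option String :=
  pvFindRank (font_paths.foldl pvStepB PySem.Dict.empty)

-- ===== PRECONDITION & SPEC =====
def Spec_get_best_candidate (font_paths : List String) (out : Option String) : Prop := out = get_best_candidate_alt font_paths
instance (font_paths : List String) (out : Option String) : Decidable (Spec_get_best_candidate font_paths out) := by unfold Spec_get_best_candidate; infer_instance

-- ===== CLAIM (what is proved, stated in full; the proofs are below) =====
def Claim_equal_get_best_candidate : Prop := ∀ (font_paths : List String), Dom_get_best_candidate font_paths → Spec_get_best_candidate font_paths (get_best_candidate font_paths)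

-- ===== LEMMAS AND PROOFS =====

-- A's min(...) fold, with a general accumulator (min? cs pvScore = pvMinFold cs none by rfl)
def pvMinFold (cs : List String) (a : Option String) : Option String :=
  cs.foldl (fun acc x =>
    match acc with
    | none => some x
    | some m => if pvScore x < pvScore m then some x else some m) a

-- B's enumerate-find over the lowered table computes A's score loop
lemma pvFindMap_eq_scoreGo : ∀ (l : List (String × Int)) (p : String),
    (match (l.map (fun sr => (sr.2, PySem.Str.lower sr.1))).find?
        (fun q => PySem.Str.isIn q.2 (PySem.Str.lower p)) with
     | some q => q.1
     | none => 99) = pvScoreGo l p := by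
  intro l p
  induction l with
  | nil => rfl
  | cons sr rest ih =>
    obtain ⟨s, r⟩ := sr
    simp only [List.map_cons]
    cases h : PySem.Chars.isIn (PySem.Chars.lower s.toList) (PySem.Chars.lower p.toList) with
    | true =>
      rw [List.find?_cons_of_pos (by simp [h])]
      simp [pvScoreGo, h]
    | false =>
      rw [List.find?_cons_of_neg (by simp [h]), ih]
      simp [pvScoreGo, h]

lemma pvRank_eq_score (p : String) : pvRankB (PySem.Str.lower p) = pvScore p := by
  have key : PySem.List.enumerate pvStylesB
      = pvStyleRank.items.map (fun sr => (sr.2, PySem.Str.lower sr.1)) := by decide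
  unfold pvRankB pvScore
  rw [key]
  exact pvFindMap_eq_scoreGo _ p

-- the score is always one of the table ranks or 99
lemma pvScoreGo_mem : ∀ (l : List (String × Int)) (p : String),
    pvScoreGo l p = 99 ∨ pvScoreGo l p ∈ l.map (·.2) := by
  intro l p
  induction l with
  | nil => exact Or.inl rfl
  | cons sr rest ih =>
    obtain ⟨s, r⟩ := sr
    cases h : PySem.Chars.isIn (PySem.Chars.lower s.toList) (PySem.Chars.lower p.toList) with
    | true => right; simp [pvScoreGo, h]
    | false =>
      rcases ih with h99 | hmem
      · left; simp [pvScoreGo, h, h99]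
      · right; simp only [pvScoreGo, List.map_cons, List.mem_cons]
        right; simpa [h] using hmem

lemma pvScore_mem (p : String) : pvScore p ∈ ([0,1,2,3,4,5,6,7,8,9,99] : List Int) := by
  unfold pvScore
  have h := pvScoreGo_mem pvStyleRank.items p
  have hl : pvStyleRank.items.map (·.2) = ([0,1,2,3,4,5,6,7,8,9] : List Int) := rfl
  rw [hl] at h
  generalize pvScoreGo pvStyleRank.items p = s at h ⊢
  simp only [List.mem_cons, List.not_mem_nil, or_false] at h ⊢
  tauto

-- bucket contents: the fold's bucket r holds the first candidate of score r
lemma pvBucket_get : ∀ (cs : List String) (d : PySem.Dict Int String) (r : Int),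
    ((cs.foldl (fun d c => d.setdefault (pvScore c) c) d).get? r)
      = match d.get? r with
        | some v => some v
        | none => cs.find? (fun c => pvScore c == r) := by
  intro cs
  induction cs with
  | nil =>
    intro d r
    simp only [List.foldl_nil]
    cases d.get? r <;> rfl
  | cons c cs ih =>
    intro d r
    rw [List.foldl_cons, ih]
    by_cases hr : r = pvScore c
    · subst hr
      rw [PySem.Dict.get?_setdefault_self]
      cases hd : d.get? (pvScore c) with
      | some v => simp
      | none => simp
    · rw [PySem.Dict.get?_setdefault_of_ne _ c hr]
      have : (pvScore c == r) = false := by simp [Ne.symm hr]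
      cases hd : d.get? r <;> simp [this]

-- keep-the-first-minimum: the fold never replaces an accumulator no element beats
lemma pvMinFold_keep : ∀ (cs : List String) (b : String),
    (∀ c ∈ cs, ¬ (pvScore c < pvScore b)) → pvMinFold cs (some b) = some b := by
  intro cs
  induction cs with
  | nil => intro b _; rfl
  | cons c cs ih =>
    intro b h
    have hc : ¬ (pvScore c < pvScore b) := h c (by simp)
    show pvMinFold cs (if pvScore c < pvScore b then some c else some b) = some b
    rw [if_neg hc]
    exact ih b (fun x hx => h x (by simp [hx]))

-- the fold finds the first element of the minimal score r
lemma pvMinFold_first : ∀ (cs : List String) (a : Option String) (r : Int),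
    (∀ c ∈ cs, r ≤ pvScore c) → (∀ b, a = some b → r < pvScore b) →
    (cs.find? (fun c => pvScore c == r)).isSome →
    pvMinFold cs a = cs.find? (fun c => pvScore c == r) := by
  intro cs
  induction cs with
  | nil => intro a r _ _ h; simp at h
  | cons c cs ih =>
    intro a r hle ha hsome
    by_cases hc : pvScore c = r
    · rw [List.find?_cons_of_pos (by simp [hc])]
      have hstep : pvMinFold (c :: cs) a = pvMinFold cs (some c) := by
        cases a with
        | none => rfl
        | some b =>
          have hlt : pvScore c < pvScore b := hc ▸ ha b rfl
          show pvMinFold cs (if pvScore c < pvScore b then some c else some b) = _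
          rw [if_pos hlt]
      rw [hstep]
      exact pvMinFold_keep cs c (fun x hx => by have := hle x (by simp [hx]); omega)
    · have hlt : r < pvScore c := lt_of_le_of_ne (hle c (by simp)) (Ne.symm hc)
      rw [List.find?_cons_of_neg (by simp [hc])]
      rw [List.find?_cons_of_neg (by simp [hc])] at hsome
      cases a with
      | none =>
        have hstep : pvMinFold (c :: cs) none = pvMinFold cs (some c) := rfl
        rw [hstep]
        refine ih _ r (fun x hx => hle x (by simp [hx])) ?_ hsome
        intro b hb
        have hcb := Option.some.inj hb
        subst hcb
        exact hlt
      | some m =>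
        have hstep : pvMinFold (c :: cs) (some m)
            = pvMinFold cs (if pvScore c < pvScore m then some c else some m) := rfl
        rw [hstep]
        refine ih _ r (fun x hx => hle x (by simp [hx])) ?_ hsome
        intro b hb
        by_cases hcm : pvScore c < pvScore m
        · rw [if_pos hcm] at hb
          have hcb := Option.some.inj hb
          subst hcb
          exact hlt
        · rw [if_neg hcm] at hb
          have hcb := Option.some.inj hb
          subst hcb
          exact ha m rfl

-- rank-major probing over a strictly increasing rank list equals the min-fold
lemma pvRankSearch : ∀ (rs : List Int) (cs : List String),
    rs.Pairwise (· < ·) → (∀ c ∈ cs, pvScore c ∈ rs) →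
    pvMinFold cs none
      = match rs.find? (fun r => (cs.find? (fun c => pvScore c == r)).isSome) with
        | some r => cs.find? (fun c => pvScore c == r)
        | none => none := by
  intro rs
  induction rs with
  | nil =>
    intro cs _ hmem
    cases cs with
    | nil => rfl
    | cons c cs => exact absurd (hmem c (by simp)) (by simp)
  | cons r rs ih =>
    intro cs hp hmem
    cases hfr : (cs.find? (fun c => pvScore c == r)).isSome with
    | true =>
      rw [List.find?_cons_of_pos (by simpa using hfr)]
      apply pvMinFold_first cs none r _ (by simp) hfr
      intro c hc
      rcases List.mem_cons.mp (hmem c hc) with h | h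
      · omega
      · exact le_of_lt (List.rel_of_pairwise_cons hp h)
    | false =>
      have hno : ∀ x ∈ cs, ¬ ((pvScore x == r) = true) :=
        List.find?_eq_none.mp (Option.not_isSome_iff_eq_none.mp (by simp [hfr]))
      rw [List.find?_cons_of_neg (by simp [hfr])]
      apply ih cs (List.Pairwise.sublist (by simp) hp)
      intro c hc
      rcases List.mem_cons.mp (hmem c hc) with h | h
      · exact absurd (by simp [h]) (hno c hc)
      · exact h

-- ===== VERDICT (by name: the statement is the Claim_ definition above) =====
theorem get_best_candidate_spec : Claim_equal_get_best_candidate := by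
  intro xs _
  show get_best_candidate xs = get_best_candidate_alt xs
  unfold get_best_candidate get_best_candidate_alt
  set pred := fun p => PySem.Str.isIn "mono" (PySem.Str.lower p) &&
    !PySem.Str.isIn "italic" (PySem.Str.lower p) &&
    !PySem.Str.isIn "propo" (PySem.Str.lower p) with hpred
  have hfun : pvStepB = fun (d : PySem.Dict Int String) p =>
      if pred p then d.setdefault (pvScore p) p else d := by
    funext d p
    show (if pred p then d.setdefault (pvRankB (PySem.Str.lower p)) p else d) = _
    rw [pvRank_eq_score]
  have hBfold : xs.foldl pvStepB PySem.Dict.empty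
      = (xs.filter pred).foldl (fun d c => d.setdefault (pvScore c) c) PySem.Dict.empty := by
    rw [hfun, ← List.foldl_filter]
  set cs := xs.filter pred with hcs
  have hget : ∀ r : Int,
      ((cs.foldl (fun d c => d.setdefault (pvScore c) c) PySem.Dict.empty).get? r)
        = cs.find? (fun c => pvScore c == r) := by
    intro r
    rw [pvBucket_get]
    simp [PySem.Dict.get?_empty]
  rw [hBfold]
  unfold pvFindRank
  have hcont : (fun r => (cs.foldl (fun d c => d.setdefault (pvScore c) c) PySem.Dict.empty).contains r)
      = (fun r => (cs.find? (fun c => pvScore c == r)).isSome) := by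
    funext r
    rw [PySem.Dict.contains_eq_isSome_get?, hget r]
  rw [hcont]
  simp only [hget]
  have hA : PySem.List.min? cs pvScore = pvMinFold cs none := by
    unfold PySem.List.min? pvMinFold
    apply List.foldl_ext
    intro acc x _
    cases acc <;> rfl
  rw [hA, pvRankSearch ([0,1,2,3,4,5,6,7,8,9,99] : List Int) cs (by decide) (fun c _ => pvScore_mem c)]
  have hsplit : ([0,1,2,3,4,5,6,7,8,9,99] : List Int) = ([0,1,2,3,4,5,6,7,8,9] : List Int) ++ [99] := rfl
  have hrange : PySem.List.pyRange 0 10 1 = ([0,1,2,3,4,5,6,7,8,9] : List Int) := by decide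
  rw [hsplit, List.find?_append, hrange]
  cases hf : ([0,1,2,3,4,5,6,7,8,9] : List Int).find? (fun r => (cs.find? (fun c => pvScore c == r)).isSome) with
  | some r => simp
  | none =>
    simp only [Option.none_or]
    cases hf99 : cs.find? (fun c => pvScore c == (99 : Int)) with
    | some v => simp [hf99]
    | none => simp [hf99]
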